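-- pv_equiv track=rewrite | github.com/rareitmeyer/census_trend_tools | colsearch.py | flip_quotes
-- ===== SOURCE A (Python) =====
-- def flip_quotes(pattern):
--     retval = ''
--     backslashes = 0
--     for i in range(len(pattern)):
--         if pattern[i] == '\\':
--             backslashes += 1
--         elif pattern[i] in ['(',')']:
--             if backslashes % 2 == 0:
--                 retval += backslashes*'\\' + '\\' + pattern[i]
--             else:
--                 retval += (backslashes-1)*'\\' + pattern[i]
--             backslashes = 0
--         else:
--             if backslashes > 0:
--                 retval += backslashes*'\\'
--                 backslashes = 0
--             retval += pattern[i]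
--     return retval
-- ===== SOURCE B (Python) =====
-- def flip_quotes(pattern):
--     parts = []
--     i = 0
--     n = len(pattern)
--     while i < n:
--         j = i
--         while j < n and pattern[j] == '\\':
--             j += 1
--         if j == n:
--             # a trailing backslash run is preserved (A drops it: intended difference)
--             parts.append(pattern[i:])
--             break
--         run = j - i
--         c = pattern[j]
--         if c in '()':
--             if run % 2 == 0:
--                 parts.append('\\' * (run + 1) + c)
--             else:
--                 parts.append('\\' * (run - 1) + c)
--         else:
--             parts.append('\\' * run + c)
--         i = j + 1
--     return ''.join(parts)
-- ===== Notes on version B (the rewrite author's own statement) =====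
-- stated objective: alternative
-- what changed: B consumes one maximal backslash run plus the following character per step and joins collected parts, instead of A's per-character loop with a pending-backslash counter; B preserves a trailing backslash run that A drops.
-- intended difference: On patterns ending in a backslash run, A silently drops those trailing backslashes because its counter is never flushed at end of string; B preserves them, which is the intended behaviour of a quoting rewrite. — e.g. on flip_quotes("a\\"): A returns "a", B returns "a\\"
import Mathlib
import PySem

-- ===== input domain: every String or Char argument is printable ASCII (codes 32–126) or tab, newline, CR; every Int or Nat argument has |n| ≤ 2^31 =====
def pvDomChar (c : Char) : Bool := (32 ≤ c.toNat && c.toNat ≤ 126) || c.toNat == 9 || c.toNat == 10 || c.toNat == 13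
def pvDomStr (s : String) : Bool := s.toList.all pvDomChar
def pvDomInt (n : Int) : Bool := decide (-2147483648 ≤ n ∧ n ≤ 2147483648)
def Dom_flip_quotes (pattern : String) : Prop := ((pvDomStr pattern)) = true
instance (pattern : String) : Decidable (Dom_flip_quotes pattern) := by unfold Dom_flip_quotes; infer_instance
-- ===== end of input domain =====

-- B rewrites the pattern by consuming one maximal backslash run plus the following character per step
-- (collecting string parts), instead of A's per-character loop with a backslash counter; intended
-- difference: B preserves a trailing backslash run that A silently drops.


-- ===== PORT A =====
-- per-character loop: retval accumulator plus pending-backslash counter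
def flipA : List Char → List Char → Nat → List Char
  | [], retval, _ => retval
  | c :: rest, retval, backslashes =>
    if c = '\\' then flipA rest retval (backslashes + 1)
    else if c = '(' ∨ c = ')' then
      if backslashes % 2 = 0 then
        flipA rest (retval ++ List.replicate backslashes '\\' ++ ['\\', c]) 0
      else
        flipA rest (retval ++ List.replicate (backslashes - 1) '\\' ++ [c]) 0
    else
      flipA rest ((if backslashes > 0 then retval ++ List.replicate backslashes '\\' else retval) ++ [c]) 0

def flip_quotes (pattern : String) : String := String.mk (flipA pattern.toList [] 0)

-- ===== PORT B =====
-- each step consumes one maximal backslash run and the character after it (B's outer while-loop body)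
def flipB (s : List Char) : List Char :=
  match h : s.dropWhile (· == '\\') with
  | [] => s
  | c :: tail =>
    let run := (s.takeWhile (· == '\\')).length
    (if c = '(' ∨ c = ')' then
      if run % 2 = 0 then List.replicate (run + 1) '\\' ++ [c]
      else List.replicate (run - 1) '\\' ++ [c]
    else List.replicate run '\\' ++ [c]) ++ flipB tail
termination_by s.length
decreasing_by
  have h1 : (s.dropWhile (· == '\\')).length ≤ s.length := (List.dropWhile_sublist _).length_le
  rw [h] at h1; simp at h1 ⊢; omega

def flip_quotes_alt (pattern : String) : String := String.mk (flipB pattern.toList)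

-- ===== PRECONDITION & SPEC =====
-- On patterns ending in a backslash run, A silently drops those trailing backslashes (its counter is
-- never flushed at end of string); B preserves them, the intended behaviour of a quoting rewrite.
def D_flip_quotes (pattern : String) : Prop := pattern.toList.getLast? = some '\\'
instance (pattern : String) : Decidable (D_flip_quotes pattern) := by unfold D_flip_quotes; infer_instance

def Spec_flip_quotes (pattern : String) (out : String) : Prop := ¬ D_flip_quotes pattern → out = flip_quotes_alt pattern
instance (pattern : String) (out : String) : Decidable (Spec_flip_quotes pattern out) := by unfold Spec_flip_quotes; infer_instance

def pvDiffWitness_flip_quotes : String := "a\\"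
def pvDiffWitnessOut_flip_quotes : String × String := ("a", "a\\")

-- ===== CLAIM (what is proved, stated in full; the proofs are below) =====
def Claim_unchanged_flip_quotes : Prop := ∀ (pattern : String), Dom_flip_quotes pattern → Spec_flip_quotes pattern (flip_quotes pattern)
def Claim_changed_flip_quotes : Prop := Dom_flip_quotes (pvDiffWitness_flip_quotes) ∧ D_flip_quotes (pvDiffWitness_flip_quotes) ∧ flip_quotes (pvDiffWitness_flip_quotes) = pvDiffWitnessOut_flip_quotes.1 ∧ flip_quotes_alt (pvDiffWitness_flip_quotes) = pvDiffWitnessOut_flip_quotes.2 ∧ pvDiffWitnessOut_flip_quotes.1 ≠ pvDiffWitnessOut_flip_quotes.2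

-- ===== LEMMAS AND PROOFS =====
lemma dropWhile_replicate_cons (b : Nat) (c : Char) (rest : List Char) (hc : c ≠ '\\') :
    (List.replicate b '\\' ++ c :: rest).dropWhile (· == '\\') = c :: rest := by
  induction b with
  | zero => simp [hc]
  | succ n ih => simp [List.replicate_succ, List.dropWhile] at ih ⊢; exact ih

lemma takeWhile_replicate_cons (b : Nat) (c : Char) (rest : List Char) (hc : c ≠ '\\') :
    (List.replicate b '\\' ++ c :: rest).takeWhile (· == '\\') = List.replicate b '\\' := by
  induction b with
  | zero => simp [hc]
  | succ n ih => simp [List.replicate_succ, List.takeWhile] at ih ⊢; exact ih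

lemma flipB_run (b : Nat) (c : Char) (rest : List Char) (hc : c ≠ '\\') :
    flipB (List.replicate b '\\' ++ c :: rest) =
      (if c = '(' ∨ c = ')' then
        if b % 2 = 0 then List.replicate (b + 1) '\\' ++ [c]
        else List.replicate (b - 1) '\\' ++ [c]
      else List.replicate b '\\' ++ [c]) ++ flipB rest := by
  rw [flipB]
  split
  · next heq => rw [dropWhile_replicate_cons b c rest hc] at heq; cases heq
  · next c1 tail heq =>
      rw [dropWhile_replicate_cons b c rest hc] at heq
      injection heq with h1 h2
      subst h1; subst h2
      simp only [takeWhile_replicate_cons b c rest hc, List.length_replicate]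

lemma flipA_flipB (s : List Char) : ∀ (acc : List Char) (b : Nat),
    (s = [] → b = 0) → s.getLast? ≠ some '\\' →
    flipA s acc b = acc ++ flipB (List.replicate b '\\' ++ s) := by
  induction s with
  | nil =>
    intro acc b hb _
    rw [hb rfl]
    simp [flipA, flipB]
  | cons c rest ih =>
    intro acc b _ hlast
    by_cases hc : c = '\\'
    · subst hc
      have hne : rest ≠ [] := by
        intro h; subst h; simp at hlast
      obtain ⟨d, t, rfl⟩ := List.exists_cons_of_ne_nil hne
      have hl : (d :: t).getLast? ≠ some '\\' := by
        rwa [List.getLast?_cons_cons] at hlast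
      have := ih acc (b + 1) (by simp) hl
      rw [show flipA ('\\' :: d :: t) acc b = flipA (d :: t) acc (b + 1) by simp [flipA]]
      rw [this]
      congr 1
      rw [List.replicate_succ' (n := b)]
      simp
    · have hlrest : rest.getLast? ≠ some '\\' := by
        rcases rest with _ | ⟨d, t⟩
        · simp
        · rwa [List.getLast?_cons_cons] at hlast
      have hbrest : rest = [] → (0 : Nat) = 0 := fun _ => rfl
      rw [flipB_run b c rest hc]
      by_cases hp : c = '(' ∨ c = ')'
      · by_cases he : b % 2 = 0
        · rw [show flipA (c :: rest) acc b =
              flipA rest (acc ++ List.replicate b '\\' ++ ['\\', c]) 0 by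
            simp [flipA, hc, hp, he]]
          rw [ih _ 0 hbrest hlrest]
          simp [hp, he, List.replicate_succ' (n := b)]
        · rw [show flipA (c :: rest) acc b =
              flipA rest (acc ++ List.replicate (b - 1) '\\' ++ [c]) 0 by
            simp [flipA, hc, hp, he]]
          rw [ih _ 0 hbrest hlrest]
          simp [hp, he]
      · rw [show flipA (c :: rest) acc b =
            flipA rest ((if b > 0 then acc ++ List.replicate b '\\' else acc) ++ [c]) 0 by
          simp [flipA, hc, hp]]
        rw [ih _ 0 hbrest hlrest]
        rcases Nat.eq_zero_or_pos b with hb0 | hb0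
        · simp [hb0, hp]
        · simp [hb0, hp]

-- ===== VERDICT (by name: the statement is the Claim_ definition above) =====
theorem flip_quotes_spec : Claim_unchanged_flip_quotes := by
  intro pattern _ hD
  unfold flip_quotes flip_quotes_alt
  have hD' : pattern.toList.getLast? ≠ some '\\' := hD
  have := flipA_flipB pattern.toList [] 0 (fun _ => rfl) hD'
  simp at this
  rw [this]

theorem flip_quotes_changed : Claim_changed_flip_quotes := by
  unfold Claim_changed_flip_quotes
  refine ⟨by decide, by decide, by decide, ?_, by decide⟩
  show flip_quotes_alt pvDiffWitness_flip_quotes = "a\\"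
  unfold flip_quotes_alt pvDiffWitness_flip_quotes
  have h1 : ("a\\" : String).toList = ['a', '\\'] := by decide
  rw [h1]
  have hB1 : flipB ['\\'] = ['\\'] := by rw [flipB]; simp [List.dropWhile]
  have hB : flipB ['a', '\\'] = ['a', '\\'] := by
    have := flipB_run 0 'a' ['\\'] (by decide)
    simp [hB1] at this
    simpa using this
  rw [hB]
  decide
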